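-- pv_equiv track=rewrite | github.com/john35452/GFG_Weekly_Coding_Contest | gfg-weekly-coding-contest-69/Make Array.py | makeArray
-- ===== SOURCE A (Python) =====
-- def makeArray(S : str, NUM : int, K : int) -> int:
--     # code here
--     n = len(S)
--     M = 10**9 + 7
--     val = [0]*(n + 1)
--     base = 1
--     for i in range(n - 1, -1, -1):
--         val[i] = (val[i + 1] + int(S[i]) * base) % NUM
--         base = (10 * base) % NUM
--
--     dp = [[0]*2 for i in range(K + 1)]
--     nextDp = [[0]*2 for i in range(K + 1)]
--     dp[0][0] = 1
--     for i in range(n - 1, -1, -1):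
--         nextDp[0][0] = dp[0][0]
--         nextDp[0][1] = dp[0][1]
--         for j in range(1, K + 1):
--             nextDp[j][0] = dp[j][0]
--             nextDp[j][1] = dp[j - 1][1]
--             if val[i] == 0:
--                 nextDp[j][0] += dp[j][1]
--                 nextDp[j][1] += dp[j - 1][0]
--             nextDp[j][0] %= M
--             nextDp[j][1] %= M
--         dp, nextDp = nextDp, dp
--     return (dp[K][0] + dp[K][1]) % M
-- ===== SOURCE B (Python) =====
-- def makeArray(S: str, NUM: int, K: int) -> int:
--     # Transposed DP: instead of sweeping characters with an inner parts-loop over a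
--     # 2-D table, build the table part-count-major.  Layer j is a pair of arrays
--     # indexed by POSITION: c1[i] (an open part started at or right of i) comes from
--     # layer j-1 by a pointwise zip, c0[i] (j parts completed in S[i:]) is a backward
--     # prefix-scan of c1 with a single accumulator.  K layers, each two linear passes.
--     M = 10 ** 9 + 7
--     rem, base, rems = 0, 1, []
--     for c in reversed(S):
--         rem = (rem + int(c) * base) % NUM
--         base = (10 * base) % NUM
--         rems.append(rem)
--     rems.reverse()
--     good = [r == 0 for r in rems]          # good[i]: S[i:] divisible by NUM
--     n = len(S)
--     c0, c1 = [1] * (n + 1), [0] * (n + 1)  # layer 0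
--     for _ in range(K):
--         c1 = [(y + x) % M if g else y for g, x, y in zip(good, c0[1:], c1[1:])] + [0]
--         acc, out = 0, [0]
--         for g, x in zip(reversed(good), reversed(c1[1:])):
--             if g:
--                 acc = (acc + x) % M
--             out.append(acc)
--         c0 = out[::-1]
--     return (c0[0] + c1[0]) % M
-- ===== Notes on version B (the rewrite author's own statement) =====
-- stated objective: alternative
-- what changed: B transposes A's loop nest: instead of A's character-major sweep carrying a 2-D (parts x parity) rolling table with an inner parts-loop, B builds the DP part-count-major -- layer j is a pair of arrays indexed by string position, obtained from layer j-1 by one pointwise zip (open-part channel) and one backward prefix-scan with a single accumulator (completed-parts channel); the suffix-remainder list is likewise built by a fold over the reversed string instead of a preallocated index-written array.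
import Mathlib
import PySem

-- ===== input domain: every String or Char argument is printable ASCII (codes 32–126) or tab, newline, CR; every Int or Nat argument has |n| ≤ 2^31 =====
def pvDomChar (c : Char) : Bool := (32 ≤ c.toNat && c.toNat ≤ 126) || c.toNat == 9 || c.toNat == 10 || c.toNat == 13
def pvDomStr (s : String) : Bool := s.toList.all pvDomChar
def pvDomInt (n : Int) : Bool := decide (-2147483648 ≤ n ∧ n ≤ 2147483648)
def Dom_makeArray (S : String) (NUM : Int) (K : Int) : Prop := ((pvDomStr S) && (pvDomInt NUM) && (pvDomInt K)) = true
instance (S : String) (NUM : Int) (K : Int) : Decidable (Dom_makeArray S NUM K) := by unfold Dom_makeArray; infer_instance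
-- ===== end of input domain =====

-- B transposes A's loop nest: A sweeps characters with an inner parts-loop over a
-- 2-D rolling table; B builds the DP part-count-major, each layer a pair of
-- position-indexed arrays made by a pointwise zip and a backward prefix-scan.


-- int(c) for a single character c (exact for the digit strings Pre_ admits)
def pvDigit (c : Char) : Int := (PySem.Int.ofChars? [c]).getD 0

-- ===== PORT A =====
-- pvCell d j b = d[j][b] (all indices the Python uses are in range under Pre_)
def pvCell (d : List (List Int)) (j b : Int) : Int :=
  (PySem.List.pyGet? ((PySem.List.pyGet? d j).getD []) b).getD 0

-- body of 'for i in range(n-1, -1, -1)' building val (state: (val, base))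
def pvValStep (S : String) (NUM : Int) (st : List Int × Int) (i : Int) : List Int × Int :=
  (st.1.set i.toNat (PySem.Int.mod ((PySem.List.pyGet? st.1 (i + 1)).getD 0 +
      ((PySem.Str.pyGet? S i).map pvDigit).getD 0 * st.2) NUM),
   PySem.Int.mod (10 * st.2) NUM)

-- body of 'for j in range(1, K+1)' (nextDp[j][0], nextDp[j][1] assignments)
def pvInnerStep (M : Int) (val : List Int) (dp : List (List Int)) (i : Int)
    (nd : List (List Int)) (j : Int) : List (List Int) :=
  let v0 := pvCell dp j 0
  let v1 := pvCell dp (j - 1) 1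
  let v0 := if (PySem.List.pyGet? val i).getD 0 = 0 then v0 + pvCell dp j 1 else v0
  let v1 := if (PySem.List.pyGet? val i).getD 0 = 0 then v1 + pvCell dp (j - 1) 0 else v1
  nd.set j.toNat (((nd.getD j.toNat []).set 0 (PySem.Int.mod v0 M)).set 1 (PySem.Int.mod v1 M))

-- body of 'for i in range(n-1, -1, -1)' (copy row 0, inner loop, swap); state (dp, nextDp)
def pvDpStep (K M : Int) (val : List Int)
    (st : List (List Int) × List (List Int)) (i : Int) :
    List (List Int) × List (List Int) :=
  let dp := st.1
  let nd0 := st.2.set 0 (((st.2.getD 0 []).set 0 (pvCell dp 0 0)).set 1 (pvCell dp 0 1))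
  let nd := (PySem.List.pyRange 1 (K + 1) 1).foldl (pvInnerStep M val dp i) nd0
  (nd, dp)

def makeArray (S : String) (NUM : Int) (K : Int) : Int :=
  let n : Int := PySem.Str.len S
  let M : Int := 10 ^ 9 + 7
  let val : List Int :=
    ((PySem.List.pyRange (n - 1) (-1) (-1)).foldl (pvValStep S NUM)
      (List.replicate (n + 1).toNat 0, 1)).1
  let dp0 : List (List Int) := (PySem.List.pyRange 0 (K + 1) 1).map (fun _ => ([0, 0] : List Int))
  let dpInit : List (List Int) := dp0.set 0 ((dp0.getD 0 []).set 0 1)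
  let fin : List (List Int) :=
    ((PySem.List.pyRange (n - 1) (-1) (-1)).foldl (pvDpStep K M val) (dpInit, dp0)).1
  PySem.Int.mod (pvCell fin K 0 + pvCell fin K 1) M

-- ===== PORT B =====
-- 'for c in reversed(S)' building rems (state: (rem, base, rems))
def pvRemStep (NUM : Int) (st : Int × Int × List Int) (c : Char) : Int × Int × List Int :=
  let rem := PySem.Int.mod (st.1 + pvDigit c * st.2.1) NUM
  (rem, PySem.Int.mod (10 * st.2.1) NUM, st.2.2 ++ [rem])

-- 'for g, x in zip(reversed(good), reversed(c1[1:]))' (state: (acc, out))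
def pvScanStep (M : Int) (st : Int × List Int) (gx : Bool × Int) : Int × List Int :=
  let acc := if gx.1 then PySem.Int.mod (st.1 + gx.2) M else st.1
  (acc, st.2 ++ [acc])

-- one iteration of 'for _ in range(K)': pointwise zip for c1, backward scan for c0
def pvLayerStep (M : Int) (good : List Bool) (st : List Int × List Int) (_ : Int) :
    List Int × List Int :=
  let c1 := (good.zip ((PySem.List.slice st.1 (some 1) none).zip
      (PySem.List.slice st.2 (some 1) none))).map
      (fun gxy => if gxy.1 then PySem.Int.mod (gxy.2.2 + gxy.2.1) M else gxy.2.2) ++ [0]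
  let so := (good.reverse.zip (PySem.List.slice c1 (some 1) none).reverse).foldl
      (pvScanStep M) (0, [0])
  (so.2.reverse, c1)

def makeArray_alt (S : String) (NUM : Int) (K : Int) : Int :=
  let M : Int := 10 ^ 9 + 7
  let r := S.toList.reverse.foldl (pvRemStep NUM) (0, 1, [])
  let rems := r.2.2.reverse
  let good := rems.map (fun x => x == 0)
  let n : Int := PySem.Str.len S
  let st := (PySem.List.pyRange 0 K 1).foldl (pvLayerStep M good)
      (List.replicate (n + 1).toNat 1, List.replicate (n + 1).toNat 0)
  PySem.Int.mod ((PySem.List.pyGet? st.1 0).getD 0 + (PySem.List.pyGet? st.2 0).getD 0) M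

-- ===== PRECONDITION & SPEC =====
-- Exactly where the Python A returns: every character a decimal digit (else int(S[i])
-- raises ValueError), NUM ≠ 0 unless S is empty (else '% NUM' raises ZeroDivisionError),
-- and K ≥ 0 (else dp[0][0] = 1 raises IndexError).
def Pre_makeArray (S : String) (NUM : Int) (K : Int) : Prop :=
  (S.toList.all (fun c => c.isDigit) = true) ∧ (NUM ≠ 0 ∨ S.toList = []) ∧ 0 ≤ K
instance (S : String) (NUM : Int) (K : Int) : Decidable (Pre_makeArray S NUM K) := by
  unfold Pre_makeArray; infer_instance

def pvWitness_makeArray : String × Int × Int := ("1230", 3, 2)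

def Spec_makeArray (S : String) (NUM : Int) (K : Int) (out : Int) : Prop := out = makeArray_alt S NUM K
instance (S : String) (NUM : Int) (K : Int) (out : Int) : Decidable (Spec_makeArray S NUM K out) := by
  unfold Spec_makeArray; infer_instance

-- ===== CLAIM (what is proved, stated in full; the proofs are below) =====
def Claim_equal_makeArray : Prop := ∀ (S : String) (NUM : Int) (K : Int), Dom_makeArray S NUM K → Pre_makeArray S NUM K → Spec_makeArray S NUM K (makeArray S NUM K)

-- ===== LEMMAS AND PROOFS =====

-- iterated (10*base) % NUM starting from 1
def pvPw (NUM : Int) : Nat → Int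
  | 0 => 1
  | k + 1 => PySem.Int.mod (10 * pvPw NUM k) NUM

-- value mod NUM of a digit suffix, exactly as both programs accumulate it
def pvSv (NUM : Int) : List Int → Int
  | [] => 0
  | d :: t => PySem.Int.mod (pvSv NUM t + d * pvPw NUM t.length) NUM

-- G e: the suffix starting e characters before the end has value 0 mod NUM
def pvG (NUM : Int) (D : List Int) (e : Nat) : Bool :=
  decide (pvSv NUM (D.drop (D.length - e)) = 0)

-- the common reference DP: pvH G M t e = (c0, c1) where c0 = #ways (mod M) to place
-- t parts over the last e characters (closed), c1 = same with an open part; e is the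
-- distance from the end of the string
def pvH (G : Nat → Bool) (M : Int) : Nat → Nat → Int × Int
  | 0, _ => (1, 0)
  | _ + 1, 0 => (0, 0)
  | t + 1, e + 1 =>
      let p := pvH G M t e
      let c := pvH G M (t + 1) e
      (if G (e + 1) then PySem.Int.mod (c.1 + c.2) M else c.1,
       if G (e + 1) then PySem.Int.mod (p.2 + p.1) M else p.2)

-- A's table at distance e from the end
def pvT (G : Nat → Bool) (M : Int) (Kt : Nat) (e : Nat) : List (List Int) :=
  (List.range (Kt + 1)).map (fun j => [(pvH G M j e).1, (pvH G M j e).2])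

-- A's val array once the loop has filled indices ≥ m
def pvValA (NUM : Int) (D : List Int) (m : Nat) : List Int :=
  (List.range (D.length + 1)).map
    (fun i => if m ≤ i ∧ i < D.length then pvSv NUM (D.drop i) else 0)

theorem pvModSmall (M x : Int) (h0 : 0 ≤ x) (h1 : x < M) : PySem.Int.mod x M = x := by
  rw [PySem.Int.mod_eq_emod_of_pos (by omega)]
  exact Int.emod_eq_of_lt h0 h1

theorem pvH_bounds (G : Nat → Bool) (M : Int) (hM : 1 < M) :
    ∀ t e, (0 ≤ (pvH G M t e).1 ∧ (pvH G M t e).1 < M) ∧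
           (0 ≤ (pvH G M t e).2 ∧ (pvH G M t e).2 < M) := by
  intro t
  induction t with
  | zero => intro e; simp [pvH]; omega
  | succ t ih =>
    intro e
    induction e with
    | zero => simp [pvH]; omega
    | succ e ihe =>
      simp only [pvH]
      constructor
      · split
        · exact ⟨PySem.Int.mod_nonneg _ (by omega), PySem.Int.mod_lt _ (by omega)⟩
        · exact ihe.1
      · split
        · exact ⟨PySem.Int.mod_nonneg _ (by omega), PySem.Int.mod_lt _ (by omega)⟩
        · exact (ih e).2

theorem pvH_succ_succ_fst (G : Nat → Bool) (M : Int) (t e : Nat) :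
    (pvH G M (t + 1) (e + 1)).1
      = if G (e + 1) then PySem.Int.mod ((pvH G M (t + 1) e).1 + (pvH G M (t + 1) e).2) M
        else (pvH G M (t + 1) e).1 := by
  simp only [pvH]

theorem pvH_succ_succ_snd (G : Nat → Bool) (M : Int) (t e : Nat) :
    (pvH G M (t + 1) (e + 1)).2
      = if G (e + 1) then PySem.Int.mod ((pvH G M t e).2 + (pvH G M t e).1) M
        else (pvH G M t e).2 := by
  simp only [pvH]

theorem pvGet2_0 (x y : Int) : PySem.List.pyGet? [x, y] 0 = some x := by
  simp only [PySem.List.pyGet?]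
  rw [show ([x, y] : List Int).length = 2 from rfl,
      show PySem.List.pyIdx? 2 0 = some 0 by decide]
  rfl

theorem pvGet2_1 (x y : Int) : PySem.List.pyGet? [x, y] 1 = some y := by
  simp only [PySem.List.pyGet?]
  rw [show ([x, y] : List Int).length = 2 from rfl,
      show PySem.List.pyIdx? 2 1 = some 1 by decide]
  rfl

theorem pvRowSet (r : List Int) (h : r.length = 2) (a b : Int) :
    (r.set 0 a).set 1 b = [a, b] := by
  match r, h with
  | [x, y], _ => rfl

theorem pvT_length (G : Nat → Bool) (M : Int) (Kt e : Nat) :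
    (pvT G M Kt e).length = Kt + 1 := by simp [pvT]

theorem pvT_row2 (G : Nat → Bool) (M : Int) (Kt e : Nat) :
    ∀ r ∈ pvT G M Kt e, r.length = 2 := by
  intro r hr
  simp only [pvT, List.mem_map] at hr
  obtain ⟨j, -, rfl⟩ := hr
  rfl

theorem pvT_getElem? (G : Nat → Bool) (M : Int) (Kt e j : Nat) (hj : j ≤ Kt) :
    (pvT G M Kt e)[j]? = some [(pvH G M j e).1, (pvH G M j e).2] := by
  simp [pvT, List.getElem?_map, List.getElem?_range, Nat.lt_succ_of_le hj]

theorem pvCellT0 (G : Nat → Bool) (M : Int) (Kt e j : Nat) (hj : j ≤ Kt) :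
    pvCell (pvT G M Kt e) (j : Int) 0 = (pvH G M j e).1 := by
  unfold pvCell
  rw [PySem.List.pyGet?_natCast, pvT_getElem? G M Kt e j hj]
  simp [pvGet2_0]

theorem pvCellT1 (G : Nat → Bool) (M : Int) (Kt e j : Nat) (hj : j ≤ Kt) :
    pvCell (pvT G M Kt e) (j : Int) 1 = (pvH G M j e).2 := by
  unfold pvCell
  rw [PySem.List.pyGet?_natCast, pvT_getElem? G M Kt e j hj]
  simp [pvGet2_1]

theorem pvValA_getElem? (NUM : Int) (D : List Int) (k i : Nat) (hi : i < D.length + 1) :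
    (pvValA NUM D k)[i]? = some (if k ≤ i ∧ i < D.length then pvSv NUM (D.drop i) else 0) := by
  simp [pvValA, List.getElem?_map, List.getElem?_range, hi]

theorem pvValA_length (NUM : Int) (D : List Int) (k : Nat) :
    (pvValA NUM D k).length = D.length + 1 := by
  simp [pvValA]

theorem pvValA_top (NUM : Int) (D : List Int) :
    pvValA NUM D D.length = List.replicate (D.length + 1) 0 := by
  unfold pvValA
  rw [show (List.replicate (D.length + 1) (0:Int)) = (List.range (D.length + 1)).map (fun _ => 0) by
    rw [List.map_const', List.length_range]]
  apply List.map_congr_left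
  intro i _
  rw [if_neg (by omega)]

theorem pvValA_set (NUM : Int) (D : List Int) (m : Nat) (hm : m < D.length) :
    (pvValA NUM D (m + 1)).set m (pvSv NUM (D.drop m)) = pvValA NUM D m := by
  apply List.ext_getElem
  · simp [pvValA]
  · intro i h1 h2
    have hi : i < D.length + 1 := by
      have := h2; rw [pvValA_length] at this; exact this
    simp only [pvValA, List.getElem_set, List.getElem_map, List.getElem_range]
    by_cases hieq : m = i
    · subst hieq
      rw [if_pos rfl, if_pos ⟨le_refl m, hm⟩]
    · rw [if_neg hieq]
      have hcond : (m + 1 ≤ i ∧ i < D.length) ↔ (m ≤ i ∧ i < D.length) := by omega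
      by_cases hc : m ≤ i ∧ i < D.length
      · rw [if_pos (hcond.mpr hc), if_pos hc]
      · rw [if_neg (fun h => hc (hcond.mp h)), if_neg hc]

-- the val loop, processed from index m-1 down to 0
theorem pvVal_loop (S : String) (NUM : Int) :
    ∀ m : Nat, m ≤ S.toList.length →
      (PySem.List.pyRange ((m : Int) - 1) (-1) (-1)).foldl (pvValStep S NUM)
        (pvValA NUM (S.toList.map pvDigit) m, pvPw NUM (S.toList.length - m))
      = (pvValA NUM (S.toList.map pvDigit) 0, pvPw NUM S.toList.length) := by
  intro m
  induction m with
  | zero =>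
    intro _
    rw [PySem.List.pyRange_neg_one_eq_nil (by norm_num)]
    simp
  | succ m ih =>
    intro hm
    have hmN : m < S.toList.length := by omega
    have hDlen : (S.toList.map pvDigit).length = S.toList.length := by simp
    rw [show (((m + 1 : Nat) : Int) - 1) = (m : Int) by push_cast; ring,
        PySem.List.pyRange_neg_one_cons (by omega), List.foldl_cons]
    have hstep : pvValStep S NUM
        (pvValA NUM (S.toList.map pvDigit) (m + 1), pvPw NUM (S.toList.length - (m + 1))) (m : Int)
        = (pvValA NUM (S.toList.map pvDigit) m, pvPw NUM (S.toList.length - m)) := by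
      unfold pvValStep
      have hget : (PySem.List.pyGet? (pvValA NUM (S.toList.map pvDigit) (m + 1)) ((m : Int) + 1)).getD 0
          = pvSv NUM ((S.toList.map pvDigit).drop (m + 1)) := by
        rw [show ((m : Int) + 1) = ((m + 1 : Nat) : Int) by push_cast; ring,
            PySem.List.pyGet?_natCast,
            pvValA_getElem? NUM _ (m + 1) (m + 1) (by omega)]
        by_cases h : m + 1 < (S.toList.map pvDigit).length
        · rw [if_pos ⟨le_refl _, h⟩]; rfl
        · rw [if_neg (by omega), List.drop_eq_nil_of_le (by omega)]; rfl
      have hchar : ((PySem.Str.pyGet? S (m : Int)).map pvDigit).getD 0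
          = (S.toList.map pvDigit)[m] := by
        rw [PySem.Str.pyGet?_natCast, List.getElem?_eq_getElem hmN]
        simp [List.getElem_map]
      have hsv : PySem.Int.mod (pvSv NUM ((S.toList.map pvDigit).drop (m + 1)) +
            (S.toList.map pvDigit)[m] * pvPw NUM (S.toList.length - (m + 1))) NUM
          = pvSv NUM ((S.toList.map pvDigit).drop m) := by
        rw [List.drop_eq_getElem_cons
            (show m < (S.toList.map pvDigit).length by rw [hDlen]; exact hmN)]
        show _ = PySem.Int.mod (pvSv NUM ((S.toList.map pvDigit).drop (m + 1)) +
            (S.toList.map pvDigit)[m] * pvPw NUM ((S.toList.map pvDigit).drop (m + 1)).length) NUM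
        rw [List.length_drop,
            show (S.toList.map pvDigit).length - (m + 1) = S.toList.length - (m + 1) by omega]
      have hbase : PySem.Int.mod (10 * pvPw NUM (S.toList.length - (m + 1))) NUM
          = pvPw NUM (S.toList.length - m) := by
        rw [show S.toList.length - m = (S.toList.length - (m + 1)) + 1 by omega]
        rfl
      rw [hget, hchar, hsv, hbase]
      rw [show ((m : Int)).toNat = m from Int.toNat_natCast m]
      rw [pvValA_set NUM _ m (by omega)]
    rw [hstep]
    exact ih (by omega)

-- generic inner loop: each iteration j writes the target row T[j]
theorem pvInnerAux (K : Int) (hK : 0 ≤ K) (f : List (List Int) → Int → List (List Int))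
    (T : List (List Int)) (hT : T.length = K.toNat + 1) (hT2 : ∀ r ∈ T, r.length = 2)
    (Hf : ∀ (j : Nat) (nd : List (List Int)), 1 ≤ j → j ≤ K.toNat → nd.length = K.toNat + 1 →
        (∀ r ∈ nd, r.length = 2) → f nd (j : Int) = nd.set j (T.getD j [])) :
    ∀ (d a : Nat), K.toNat + 1 ≤ a + d → 1 ≤ a →
      ∀ nd : List (List Int), nd.length = K.toNat + 1 → (∀ r ∈ nd, r.length = 2) →
        (∀ t : Nat, t < a → nd[t]? = T[t]?) →
        (PySem.List.pyRange (a : Int) (K + 1) 1).foldl f nd = T := by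
  intro d
  induction d with
  | zero =>
    intro a hda ha nd hlen hrow hagree
    rw [PySem.List.pyRange_one_eq_nil (by omega), List.foldl_nil]
    apply List.ext_getElem?
    intro t
    by_cases ht : t < K.toNat + 1
    · exact hagree t (by omega)
    · rw [List.getElem?_eq_none (by omega), List.getElem?_eq_none (by omega)]
  | succ d ih =>
    intro a hda ha nd hlen hrow hagree
    by_cases haK : a ≤ K.toNat
    · rw [PySem.List.pyRange_one_cons (by omega), List.foldl_cons,
          Hf a nd ha haK hlen hrow,
          show ((a : Int) + 1) = ((a + 1 : Nat) : Int) by push_cast; ring]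
      apply ih (a + 1) (by omega) (by omega)
      · simp [hlen]
      · intro r hr
        rcases List.mem_or_eq_of_mem_set hr with h | h
        · exact hrow r h
        · subst h
          apply hT2
          rw [List.getD_eq_getElem T [] (by omega)]
          exact List.getElem_mem _
      · intro t ht
        by_cases hta : t = a
        · subst hta
          rw [List.getElem?_set_self (by omega), List.getD_eq_getElem T [] (by omega),
              List.getElem?_eq_getElem (by omega)]
        · rw [List.getElem?_set_ne (by omega)]
          exact hagree t (by omega)
    · rw [PySem.List.pyRange_one_eq_nil (by omega), List.foldl_nil]
      apply List.ext_getElem?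
      intro t
      by_cases ht : t < K.toNat + 1
      · exact hagree t (by omega)
      · rw [List.getElem?_eq_none (by omega), List.getElem?_eq_none (by omega)]

-- one outer iteration of A's dp loop advances the table from distance e to e+1
theorem pvDp_step (S : String) (NUM K M : Int) (hM : 1 < M) (hK : 0 ≤ K)
    (m : Nat) (hm : m < S.toList.length)
    (nd : List (List Int)) (hlen : nd.length = K.toNat + 1) (hrow : ∀ r ∈ nd, r.length = 2) :
    pvDpStep K M (pvValA NUM (S.toList.map pvDigit) 0)
      (pvT (pvG NUM (S.toList.map pvDigit)) M K.toNat (S.toList.length - (m + 1)), nd) (m : Int)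
    = (pvT (pvG NUM (S.toList.map pvDigit)) M K.toNat (S.toList.length - m),
       pvT (pvG NUM (S.toList.map pvDigit)) M K.toNat (S.toList.length - (m + 1))) := by
  have hDlen : (S.toList.map pvDigit).length = S.toList.length := by simp
  set D := S.toList.map pvDigit with hD
  set G := pvG NUM D with hGdef
  set Kt := K.toNat with hKt
  set e' := S.toList.length - (m + 1) with he'
  have hee : S.toList.length - m = e' + 1 := by omega
  have hvz : (PySem.List.pyGet? (pvValA NUM D 0) (m : Int)).getD 0 = pvSv NUM (D.drop m) := by
    rw [PySem.List.pyGet?_natCast, pvValA_getElem? NUM D 0 m (by omega),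
        if_pos ⟨Nat.zero_le m, by omega⟩]
    rfl
  have hGiff : (G (e' + 1) = true) ↔ (pvSv NUM (D.drop m) = 0) := by
    rw [hGdef, pvG, show D.length - (e' + 1) = m by omega]
    simp
  -- the target row written by inner-loop iteration j
  have hrowT : ∀ (j : Nat), j ≤ Kt →
      (pvT G M Kt (e' + 1)).getD j [] = [(pvH G M j (e' + 1)).1, (pvH G M j (e' + 1)).2] := by
    intro j hj
    rw [List.getD_eq_getElem _ _ (by rw [pvT_length]; omega)]
    simp [pvT]
  have key : ∀ (j : Nat) (nd' : List (List Int)), 1 ≤ j → j ≤ Kt →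
      nd'.length = Kt + 1 → (∀ r ∈ nd', r.length = 2) →
      pvInnerStep M (pvValA NUM D 0) (pvT G M Kt e') (m : Int) nd' (j : Int)
        = nd'.set j ((pvT G M Kt (e' + 1)).getD j []) := by
    intro j nd' hj1 hj2 hlen' hrow'
    have hjc : ((j : Int) - 1) = ((j - 1 : Nat) : Int) := by omega
    have hrow2 : (nd'.getD j []).length = 2 := by
      rw [List.getD_eq_getElem nd' [] (by omega)]
      exact hrow' _ (List.getElem_mem _)
    unfold pvInnerStep
    rw [hvz, hjc,
        pvCellT0 G M Kt e' j (by omega), pvCellT1 G M Kt e' j (by omega),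
        pvCellT0 G M Kt e' (j - 1) (by omega), pvCellT1 G M Kt e' (j - 1) (by omega),
        hrowT j hj2]
    simp only
    rw [show ((j : Int)).toNat = j from Int.toNat_natCast j]
    by_cases hz : pvSv NUM (D.drop m) = 0
    · rw [if_pos hz, if_pos hz]
      rw [show j = j - 1 + 1 by omega, pvH_succ_succ_fst, pvH_succ_succ_snd,
          if_pos (hGiff.mpr hz), if_pos (hGiff.mpr hz)]
      rw [pvRowSet _ (by rw [show j - 1 + 1 = j by omega]; exact hrow2)]
      simp [Nat.add_sub_cancel]
    · rw [if_neg hz, if_neg hz]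
      have hb0 := (pvH_bounds G M hM j e').1
      have hb1 := (pvH_bounds G M hM (j - 1) e').2
      rw [pvModSmall M _ hb0.1 hb0.2, pvModSmall M _ hb1.1 hb1.2]
      have hGz : ¬ (G (e' + 1) = true) := fun h => hz (hGiff.mp h)
      rw [show j = j - 1 + 1 by omega, pvH_succ_succ_fst, pvH_succ_succ_snd,
          if_neg hGz, if_neg hGz]
      rw [pvRowSet _ (by rw [show j - 1 + 1 = j by omega]; exact hrow2)]
      simp [Nat.add_sub_cancel]
  unfold pvDpStep
  refine Prod.ext ?_ rfl
  show (PySem.List.pyRange 1 (K + 1) 1).foldl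
      (pvInnerStep M (pvValA NUM D 0) (pvT G M Kt e') (m : Int))
      (nd.set 0 (((nd.getD 0 []).set 0 (pvCell (pvT G M Kt e') 0 0)).set 1 (pvCell (pvT G M Kt e') 0 1)))
      = pvT G M Kt (S.toList.length - m)
  have hndrow : (nd.getD 0 []).length = 2 := by
    rw [List.getD_eq_getElem nd [] (by omega)]
    exact hrow _ (List.getElem_mem _)
  have hc00 : pvCell (pvT G M Kt e') 0 0 = 1 := by
    have h := pvCellT0 G M Kt e' 0 (Nat.zero_le Kt)
    simpa [pvH] using h
  have hc01 : pvCell (pvT G M Kt e') 0 1 = 0 := by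
    have h := pvCellT1 G M Kt e' 0 (Nat.zero_le Kt)
    simpa [pvH] using h
  rw [hc00, hc01, pvRowSet _ hndrow, hee]
  have happ := pvInnerAux K hK
      (pvInnerStep M (pvValA NUM D 0) (pvT G M Kt e') (m : Int))
      (pvT G M Kt (e' + 1)) (pvT_length G M Kt (e' + 1)) (pvT_row2 G M Kt (e' + 1))
      key Kt 1 (by omega) (by omega)
      (nd.set 0 [1, 0]) (by simp [hlen, hKt]) ?_ ?_
  · rw [show ((1 : Nat) : Int) = (1 : Int) by norm_num] at happ
    exact happ
  · intro r hr
    rcases List.mem_or_eq_of_mem_set hr with h | h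
    · exact hrow r h
    · subst h; rfl
  · intro t ht
    have ht0 : t = 0 := by omega
    subst ht0
    rw [List.getElem?_set_self (by omega), pvT_getElem? G M Kt (e' + 1) 0 (by omega)]
    rfl

-- the whole dp loop from position m (table at distance n-m from the end)
theorem pvDp_loop (S : String) (NUM K M : Int) (hM : 1 < M) (hK : 0 ≤ K) :
    ∀ m : Nat, m ≤ S.toList.length →
      ∀ nd : List (List Int), nd.length = K.toNat + 1 → (∀ r ∈ nd, r.length = 2) →
      ((PySem.List.pyRange ((m : Int) - 1) (-1) (-1)).foldl
        (pvDpStep K M (pvValA NUM (S.toList.map pvDigit) 0))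
        (pvT (pvG NUM (S.toList.map pvDigit)) M K.toNat (S.toList.length - m), nd)).1
      = pvT (pvG NUM (S.toList.map pvDigit)) M K.toNat S.toList.length := by
  intro m
  induction m with
  | zero =>
    intro _ nd _ _
    rw [PySem.List.pyRange_neg_one_eq_nil (by norm_num), List.foldl_nil]
    rw [Nat.sub_zero]
  | succ m ih =>
    intro hm nd hlen hrow
    rw [show (((m + 1 : Nat) : Int) - 1) = (m : Int) by push_cast; ring,
        PySem.List.pyRange_neg_one_cons (by omega), List.foldl_cons]
    rw [pvDp_step S NUM K M hM hK m (by omega) nd hlen hrow]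
    apply ih (by omega)
    · rw [pvT_length]
    · exact pvT_row2 _ _ _ _

-- ===== B-side lemmas =====

-- B's rems fold, as a recursion front-to-back
def pvR (NUM : Int) : List Char → Int × Int × List Int
  | [] => (0, 1, [])
  | c :: t => pvRemStep NUM (pvR NUM t) c

theorem pvR_eq_fold (NUM : Int) (l : List Char) :
    l.reverse.foldl (pvRemStep NUM) (0, 1, []) = pvR NUM l := by
  induction l with
  | nil => rfl
  | cons c t ih =>
    simp only [List.reverse_cons, List.foldl_append, List.foldl_cons, List.foldl_nil, ih]
    rfl

theorem pvR_inv (NUM : Int) (l : List Char) :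
    (pvR NUM l).1 = pvSv NUM (l.map pvDigit) ∧
    (pvR NUM l).2.1 = pvPw NUM l.length ∧
    (pvR NUM l).2.2.reverse
      = (List.range l.length).map (fun i => pvSv NUM ((l.map pvDigit).drop i)) := by
  induction l with
  | nil => exact ⟨rfl, rfl, rfl⟩
  | cons c t ih =>
    obtain ⟨h1, h2, h3⟩ := ih
    have hrem : PySem.Int.mod ((pvR NUM t).1 + pvDigit c * (pvR NUM t).2.1) NUM
        = pvSv NUM ((c :: t).map pvDigit) := by
      rw [h1, h2]
      show _ = PySem.Int.mod (pvSv NUM (t.map pvDigit) + pvDigit c * pvPw NUM (t.map pvDigit).length) NUM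
      rw [List.length_map]
    refine ⟨?_, ?_, ?_⟩
    · show PySem.Int.mod ((pvR NUM t).1 + pvDigit c * (pvR NUM t).2.1) NUM = _
      exact hrem
    · show PySem.Int.mod (10 * (pvR NUM t).2.1) NUM = _
      rw [h2]; rfl
    · show ((pvR NUM t).2.2 ++ [PySem.Int.mod ((pvR NUM t).1 + pvDigit c * (pvR NUM t).2.1) NUM]).reverse = _
      rw [List.reverse_append, List.reverse_singleton, List.singleton_append, hrem, h3]
      rw [List.length_cons, List.range_succ_eq_map]
      simp only [List.map_cons, List.map_map, List.drop_zero]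
      refine congrArg₂ _ rfl ?_
      apply List.map_congr_left
      intro i _
      simp [Function.comp, List.drop_succ_cons]


theorem pvRevMap (f : Nat → Int) (m : Nat) :
    ((List.range (m + 1)).map f).reverse = (List.range (m + 1)).map (fun i => f (m - i)) := by
  apply List.ext_getElem
  · simp
  · intro i h1 h2
    simp only [List.length_reverse, List.length_map, List.length_range] at h1 h2 ⊢
    rw [List.getElem_reverse]
    simp only [List.getElem_map, List.getElem_range, List.length_map, List.length_range]
    rw [show m + 1 - 1 - i = m - i by omega]

-- the backward prefix-scan follows pvH's first channel
theorem pvScan_aux (G : Nat → Bool) (M : Int) (t : Nat) :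
    ∀ (ps : List (Bool × Int)) (k : Nat) (out0 : List Int),
      (∀ (r : Nat) (hr : r < ps.length), ps[r] = (G (k + r + 1), (pvH G M (t + 1) (k + r)).2)) →
      ps.foldl (pvScanStep M) ((pvH G M (t + 1) k).1, out0)
        = ((pvH G M (t + 1) (k + ps.length)).1,
           out0 ++ (List.range ps.length).map (fun r => (pvH G M (t + 1) (k + r + 1)).1)) := by
  intro ps
  induction ps with
  | nil => intro k out0 _; simp
  | cons p ps ih =>
    intro k out0 hps
    have hp0 : p = (G (k + 1), (pvH G M (t + 1) k).2) := by
      have := hps 0 (by simp)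
      simpa using this
    have hstep : pvScanStep M ((pvH G M (t + 1) k).1, out0) p
        = ((pvH G M (t + 1) (k + 1)).1, out0 ++ [(pvH G M (t + 1) (k + 1)).1]) := by
      rw [hp0]
      unfold pvScanStep
      rw [pvH_succ_succ_fst]
    rw [List.foldl_cons, hstep,
        ih (k + 1) (out0 ++ [(pvH G M (t + 1) (k + 1)).1]) (by
          intro r hr
          have := hps (r + 1) (by simpa using Nat.succ_lt_succ hr)
          simpa [show k + (r + 1) = k + 1 + r by omega,
                 show k + (r + 1) + 1 = k + 1 + r + 1 by omega] using this)]
    refine Prod.ext ?_ ?_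
    · simp only
      congr 2
      simp only [List.length_cons]
      omega
    · simp only [List.length_cons, List.append_assoc, List.singleton_append]
      congr 1
      rw [List.range_succ_eq_map, List.map_cons, List.map_map]
      congr 1
      apply List.map_congr_left
      intro r _
      simp only [Function.comp_apply]
      congr 2
      omega

-- the pointwise zip builds pvH's second channel for the next layer
theorem pvC1_eq (NUM M : Int) (D : List Int) (t : Nat) :
    ((((List.range D.length).map (fun i => pvSv NUM (D.drop i))).map (fun x => x == 0)).zip
        ((PySem.List.slice ((List.range (D.length + 1)).map (fun i => (pvH (pvG NUM D) M t (D.length - i)).1)) (some 1) none).zip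
          (PySem.List.slice ((List.range (D.length + 1)).map (fun i => (pvH (pvG NUM D) M t (D.length - i)).2)) (some 1) none))).map
        (fun gxy => if gxy.1 then PySem.Int.mod (gxy.2.2 + gxy.2.1) M else gxy.2.2) ++ [0]
      = (List.range (D.length + 1)).map (fun i => (pvH (pvG NUM D) M (t + 1) (D.length - i)).2) := by
  rw [PySem.List.slice_from_one, PySem.List.slice_from_one]
  apply List.ext_getElem
  · simp
  · intro k h1 h2
    simp only [List.length_append, List.length_map, List.length_zip, List.length_tail,
      List.length_range, List.length_singleton] at h1 h2
    by_cases hk : k < D.length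
    · rw [List.getElem_append_left (by
        simp only [List.length_map, List.length_zip, List.length_tail, List.length_range]
        omega)]
      simp only [List.getElem_map, List.getElem_zip, List.getElem_tail, List.getElem_range]
      rw [show D.length - k = (D.length - (k + 1)) + 1 by omega, pvH_succ_succ_snd,
          show pvG NUM D (D.length - (k + 1) + 1) = (pvSv NUM (D.drop k) == 0) by
            rw [pvG, show D.length - (D.length - (k + 1) + 1) = k by omega]; rfl]
    · have hkD : k = D.length := by omega
      subst hkD
      rw [List.getElem_append_right (by
        simp only [List.length_map, List.length_zip, List.length_tail, List.length_range]
        omega)]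
      simp only [List.length_map, List.length_zip, List.length_tail, List.length_range,
        List.getElem_map, List.getElem_range]
      rw [Nat.sub_self]
      simp [pvH]

-- B's layer pair at stage t
def pvQ (G : Nat → Bool) (M : Int) (n t : Nat) : List Int × List Int :=
  ((List.range (n + 1)).map (fun i => (pvH G M t (n - i)).1),
   (List.range (n + 1)).map (fun i => (pvH G M t (n - i)).2))

theorem pvLayerStep_eq (NUM M : Int) (D : List Int) (x : Int) (t : Nat) :
    pvLayerStep M (((List.range D.length).map (fun i => pvSv NUM (D.drop i))).map (fun x => x == 0))
      (pvQ (pvG NUM D) M D.length t) x = pvQ (pvG NUM D) M D.length (t + 1) := by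
  unfold pvLayerStep pvQ
  simp only
  rw [pvC1_eq NUM M D t]
  rw [PySem.List.slice_from_one]
  have hsc := pvScan_aux (pvG NUM D) M t
    ((((List.range D.length).map (fun i => pvSv NUM (D.drop i))).map (fun x => x == 0)).reverse.zip
      (((List.range (D.length + 1)).map (fun i => (pvH (pvG NUM D) M (t + 1) (D.length - i)).2)).tail).reverse)
    0 [0] ?hps
  case hps =>
    intro r hr
    simp only [List.length_zip, List.length_reverse, List.length_map, List.length_tail,
      List.length_range] at hr
    have hrD : r < D.length := by omega
    simp only [List.getElem_zip, List.getElem_reverse, List.getElem_tail, List.getElem_map,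
      List.getElem_range, List.length_reverse, List.length_map, List.length_tail,
      List.length_range]
    refine Prod.ext ?_ ?_
    · simp only
      rw [show pvG NUM D (0 + r + 1) = (pvSv NUM (D.drop (D.length - 1 - r)) == 0) by
        rw [pvG, show D.length - (0 + r + 1) = D.length - 1 - r by omega]; rfl]
    · simp only
      congr 2
      omega
  rw [show ((0 : Int), ([0] : List Int)) = ((pvH (pvG NUM D) M (t + 1) 0).1, ([0] : List Int)) from rfl]
  rw [hsc]
  refine Prod.ext ?_ ?_
  · simp only
    have hout : (([0] : List Int) ++ (List.range
          ((((List.range D.length).map (fun i => pvSv NUM (D.drop i))).map (fun x => x == 0)).reverse.zip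
            (((List.range (D.length + 1)).map (fun i => (pvH (pvG NUM D) M (t + 1) (D.length - i)).2)).tail).reverse).length).map
          (fun r => (pvH (pvG NUM D) M (t + 1) (0 + r + 1)).1))
        = (List.range (D.length + 1)).map (fun r => (pvH (pvG NUM D) M (t + 1) r).1) := by
      simp only [List.length_zip, List.length_reverse, List.length_map, List.length_tail,
        List.length_range, Nat.add_sub_cancel, Nat.min_self]
      rw [List.range_succ_eq_map, List.map_cons, List.map_map, List.singleton_append]
      rw [show ((pvH (pvG NUM D) M (t + 1) 0).1 : Int) = 0 from rfl]
      congr 1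
      apply List.map_congr_left
      intro r _
      simp only [Function.comp_apply, Nat.succ_eq_add_one, Nat.zero_add]
    rw [hout, pvRevMap]
  · rfl

theorem pvLayer_fold (NUM M : Int) (D : List Int) (l : List Int) :
    ∀ t : Nat,
    l.foldl (pvLayerStep M (((List.range D.length).map (fun i => pvSv NUM (D.drop i))).map (fun x => x == 0)))
      (pvQ (pvG NUM D) M D.length t)
    = pvQ (pvG NUM D) M D.length (t + l.length) := by
  induction l with
  | nil => intro t; rfl
  | cons a l ih =>
    intro t
    rw [List.foldl_cons, pvLayerStep_eq NUM M D a t, ih (t + 1)]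
    rw [List.length_cons, show t + 1 + l.length = t + (l.length + 1) by omega]

-- ===== VERDICT (by name: the statement is the Claim_ definition above) =====
theorem makeArray_spec : Claim_equal_makeArray := by
  intro S NUM K _ hPre
  obtain ⟨-, -, hK⟩ := hPre
  obtain ⟨k, rfl⟩ : ∃ k : Nat, K = (k : Int) := ⟨K.toNat, (Int.toNat_of_nonneg hK).symm⟩
  show makeArray S NUM (k : Int) = makeArray_alt S NUM (k : Int)
  have hM : (1 : Int) < 10 ^ 9 + 7 := by norm_num
  have hDlen : (S.toList.map pvDigit).length = S.toList.length := by simp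
  simp only [makeArray, makeArray_alt, PySem.Str.len_eq]
  -- A: the val loop computes pvValA … 0
  have hv : ((PySem.List.pyRange ((S.toList.length : Int) - 1) (-1) (-1)).foldl (pvValStep S NUM)
        (List.replicate ((S.toList.length : Int) + 1).toNat 0, 1)).1
      = pvValA NUM (S.toList.map pvDigit) 0 := by
    have hinit : (List.replicate ((S.toList.length : Int) + 1).toNat (0 : Int), (1 : Int))
        = (pvValA NUM (S.toList.map pvDigit) S.toList.length,
           pvPw NUM (S.toList.length - S.toList.length)) := by
      rw [show ((S.toList.length : Int) + 1).toNat = S.toList.length + 1 by omega]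
      rw [Nat.sub_self]
      rw [show pvValA NUM (S.toList.map pvDigit) S.toList.length
            = pvValA NUM (S.toList.map pvDigit) (S.toList.map pvDigit).length by rw [hDlen]]
      rw [pvValA_top, hDlen]
      rfl
    rw [hinit, pvVal_loop S NUM S.toList.length le_rfl]
  rw [hv]
  -- A: the initial table is the reference table at distance 0
  have hdp0 : (PySem.List.pyRange 0 ((k : Int) + 1) 1).map (fun _ => ([0, 0] : List Int))
      = List.replicate (k + 1) [0, 0] := by
    rw [List.map_const', PySem.List.length_pyRange_one,
        show (((k : Int) + 1 - 0 : Int)).toNat = k + 1 by omega]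
  rw [hdp0]
  have hdpInit : (List.replicate (k + 1) ([0, 0] : List Int)).set 0
        (((List.replicate (k + 1) ([0, 0] : List Int)).getD 0 []).set 0 1)
      = pvT (pvG NUM (S.toList.map pvDigit)) (10 ^ 9 + 7) k (S.toList.length - S.toList.length) := by
    rw [Nat.sub_self]
    apply List.ext_getElem
    · simp [pvT]
    · intro i h1 h2
      have hik : i < k + 1 := by simpa using h1
      simp only [pvT, List.getElem_map, List.getElem_range]
      by_cases hi : i = 0
      · subst hi
        rw [List.getElem_set_self (by simpa using hik)]
        rfl
      · rw [List.getElem_set, if_neg (fun h => hi h.symm), List.getElem_replicate,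
            show i = (i - 1) + 1 by omega]
        rfl
  rw [hdpInit]
  have hKt : ((k : Int)).toNat = k := Int.toNat_natCast k
  have hloop := pvDp_loop S NUM (k : Int) (10 ^ 9 + 7) hM (by positivity) S.toList.length le_rfl
      (List.replicate (k + 1) [0, 0]) (by simp [hKt])
      (by intro r hr; rw [List.eq_of_mem_replicate hr]; rfl)
  rw [hKt] at hloop
  rw [hloop]
  -- A: reading the two final cells
  rw [pvCellT0 (pvG NUM (S.toList.map pvDigit)) (10 ^ 9 + 7) k S.toList.length k le_rfl,
      pvCellT1 (pvG NUM (S.toList.map pvDigit)) (10 ^ 9 + 7) k S.toList.length k le_rfl]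
  -- B: the rems fold and the good list
  rw [pvR_eq_fold NUM S.toList]
  obtain ⟨-, -, h3⟩ := pvR_inv NUM S.toList
  rw [h3]
  rw [show S.toList.length = (S.toList.map pvDigit).length from hDlen.symm]
  -- B: the initial pair of channel arrays is layer 0
  have hQ0 : (List.replicate (((S.toList.map pvDigit).length : Int) + 1).toNat (1 : Int),
        List.replicate (((S.toList.map pvDigit).length : Int) + 1).toNat (0 : Int))
      = pvQ (pvG NUM (S.toList.map pvDigit)) (10 ^ 9 + 7) (S.toList.map pvDigit).length 0 := by
    unfold pvQ
    rw [show (((S.toList.map pvDigit).length : Int) + 1).toNat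
          = (S.toList.map pvDigit).length + 1 by omega]
    refine Prod.ext ?_ ?_ <;> simp only <;>
      (apply List.ext_getElem
       · simp
       · intro i h1 h2
         simp [pvH])
  rw [hQ0]
  have hfold := pvLayer_fold NUM (10 ^ 9 + 7) (S.toList.map pvDigit)
      (PySem.List.pyRange 0 (k : Int) 1) 0
  rw [PySem.List.length_pyRange_one, show (((k : Int) - 0 : Int)).toNat = k by omega] at hfold
  rw [hfold]
  -- B: reading index 0 of both layer-k arrays
  unfold pvQ
  simp only
  rw [show (0 : Int) = ((0 : Nat) : Int) from rfl, PySem.List.pyGet?_natCast,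
      PySem.List.pyGet?_natCast]
  rw [List.getElem?_eq_getElem (by simp), List.getElem?_eq_getElem (by simp)]
  simp only [List.getElem_map, List.getElem_range, Nat.sub_zero, Option.getD_some,
    Nat.zero_add]
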